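-- pv_equiv track=rewrite | github.com/Jatinpatel321/tnt-backend | app/modules/group_cart/service.py | _equal_split
-- ===== SOURCE A (Python) =====
-- def _equal_split(member_ids: list[int], total_amount: int) -> dict[int, int]:
--     if not member_ids:
--         return {}
--
--     base_share = total_amount // len(member_ids)
--     remainder = total_amount % len(member_ids)
--
--     result = {}
--     for idx, member_id in enumerate(member_ids):
--         result[member_id] = base_share + (1 if idx < remainder else 0)
--     return result
-- ===== SOURCE B (Python) =====
-- def _equal_split(member_ids: list[int], total_amount: int) -> dict[int, int]:
--     if not member_ids:
--         return {}
--     result = {}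
--     remaining = total_amount
--     count = len(member_ids)
--     for member_id in member_ids:
--         share = -(-remaining // count)  # ceiling division: leading members absorb the remainder
--         result[member_id] = share
--         remaining -= share
--         count -= 1
--     return result
-- ===== Notes on version B (the rewrite author's own statement) =====
-- stated objective: alternative
-- what changed: Replaces the precomputed base_share/remainder with an idx<remainder branch by a single pass maintaining remaining amount and remaining count, giving each member the ceiling of remaining/count.
import Mathlib
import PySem

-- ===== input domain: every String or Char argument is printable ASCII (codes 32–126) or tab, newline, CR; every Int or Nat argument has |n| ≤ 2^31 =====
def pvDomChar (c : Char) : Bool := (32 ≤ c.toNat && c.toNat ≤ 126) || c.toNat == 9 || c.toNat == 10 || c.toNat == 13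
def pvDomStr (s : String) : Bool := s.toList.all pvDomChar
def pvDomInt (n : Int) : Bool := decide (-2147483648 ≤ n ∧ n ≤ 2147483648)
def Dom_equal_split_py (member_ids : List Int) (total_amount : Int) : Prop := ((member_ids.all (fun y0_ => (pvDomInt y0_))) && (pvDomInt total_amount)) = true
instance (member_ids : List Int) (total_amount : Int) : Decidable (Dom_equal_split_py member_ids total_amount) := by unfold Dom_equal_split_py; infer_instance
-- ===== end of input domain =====

-- B splits incrementally (ceiling of remaining/count per member) instead of precomputing base share and remainder; same cost, different decomposition.


-- ===== PORT A =====
def equal_split_py (member_ids : List Int) (total_amount : Int) : List (Int × Int) :=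
  if member_ids = [] then []
  else
    let base_share := PySem.Int.floordiv total_amount (member_ids.length : Int)
    let remainder := PySem.Int.mod total_amount (member_ids.length : Int)
    ((PySem.List.enumerate member_ids 0).foldl
      (fun (result : PySem.Dict Int Int) p =>
        result.insert p.2 (base_share + (if p.1 < remainder then 1 else 0)))
      PySem.Dict.empty).items

-- ===== PORT B =====
def equal_split_py_alt (member_ids : List Int) (total_amount : Int) : List (Int × Int) :=
  if member_ids = [] then []
  else
    (member_ids.foldl
      (fun (st : PySem.Dict Int Int × Int × Int) m =>
        let share := -(PySem.Int.floordiv (-st.2.1) st.2.2)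
        (st.1.insert m share, (st.2.1 - share, st.2.2 - 1)))
      (PySem.Dict.empty, (total_amount, (member_ids.length : Int)))).1.items

-- ===== PRECONDITION & SPEC =====
def Spec_equal_split_py (member_ids : List Int) (total_amount : Int) (out : List (Int × Int)) : Prop := out = equal_split_py_alt member_ids total_amount
instance (member_ids : List Int) (total_amount : Int) (out : List (Int × Int)) : Decidable (Spec_equal_split_py member_ids total_amount out) := by unfold Spec_equal_split_py; infer_instance

-- ===== CLAIM (what is proved, stated in full; the proofs are below) =====
def Claim_equal_equal_split_py : Prop := ∀ (member_ids : List Int) (total_amount : Int), Dom_equal_split_py member_ids total_amount → Spec_equal_split_py member_ids total_amount (equal_split_py member_ids total_amount)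

-- ===== LEMMAS AND PROOFS =====

-- The ceiling share at one step: remaining = base*c + r', 0 ≤ r' ≤ c, c > 0.
lemma step_share (base r' c : Int) (hc : 0 < c) (h0 : 0 ≤ r') (hrc : r' ≤ c) :
    -(PySem.Int.floordiv (-(base * c + r')) c) = base + (if 0 < r' then 1 else 0) := by
  split_ifs with h <;> rw [PySem.Int.neg_floordiv_neg_eq_iff_of_pos hc] <;> constructor <;> nlinarith

-- B's fold produces the same dict as A's enumerate-fold, for matching state.
lemma fold_eq (base m : Int) : ∀ (xs : List Int) (d : PySem.Dict Int Int) (s r' : Int),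
    r' = max (m - s) 0 → r' ≤ xs.length →
    (xs.foldl
      (fun (st : PySem.Dict Int Int × Int × Int) mid =>
        let share := -(PySem.Int.floordiv (-st.2.1) st.2.2)
        (st.1.insert mid share, (st.2.1 - share, st.2.2 - 1)))
      (d, (base * xs.length + r', (xs.length : Int)))).1
    = (PySem.List.enumerate xs s).foldl
        (fun (result : PySem.Dict Int Int) p =>
          result.insert p.2 (base + (if p.1 < m then 1 else 0))) d := by
  intro xs
  induction xs with
  | nil =>
      intro d s r' hr hle
      simp [PySem.List.enumerate_nil]
  | cons x t ih =>
      intro d s r' hr hle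
      have hc : (0:Int) < ((x :: t).length : Int) := by exact_mod_cast Nat.succ_pos t.length
      have h0 : 0 ≤ r' := by omega
      have hshare := step_share base r' ((x :: t).length : Int) hc h0 hle
      have hle' : r' ≤ (t.length : Int) + 1 := by
        have : (x :: t).length = t.length + 1 := rfl
        omega
      have hite : (if 0 < r' then (1:Int) else 0) = (if s < m then 1 else 0) := by
        split_ifs with h1 h2 <;> omega
      have hlen : ((x :: t).length : Int) - 1 = (t.length : Int) := by
        have : (x :: t).length = t.length + 1 := rfl
        omega
      have harith : base * ((x :: t).length : Int) + r' - (base + (if s < m then 1 else 0))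
          = base * (t.length : Int) + (r' - (if s < m then 1 else 0)) := by
        have : (x :: t).length = t.length + 1 := rfl
        split_ifs <;> rw [this] <;> push_cast <;> ring
      rw [PySem.List.enumerate_cons]
      simp only [List.foldl_cons]
      rw [hshare, hite, hlen, harith]
      exact ih (d.insert x (base + if s < m then 1 else 0)) (s + 1)
            (r' - (if s < m then 1 else 0))
            (by split_ifs with h <;> omega)
            (by split_ifs with h <;> omega)

-- ===== VERDICT (by name: the statement is the Claim_ definition above) =====
theorem equal_split_py_spec : Claim_equal_equal_split_py := by
  intro member_ids total_amount _
  unfold Spec_equal_split_py equal_split_py equal_split_py_alt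
  by_cases hnil : member_ids = []
  · simp [hnil]
  · simp only [if_neg hnil]
    have hn : (0:Int) < (member_ids.length : Int) := by
      cases member_ids with
      | nil => exact absurd rfl hnil
      | cons a t => exact_mod_cast Nat.succ_pos t.length
    set n : Int := (member_ids.length : Int)
    set base := PySem.Int.floordiv total_amount n with hbase
    set r := PySem.Int.mod total_amount n with hrdef
    have hsum : base * n + r = total_amount := PySem.Int.floordiv_mul_add_mod total_amount n
    have hr0 : 0 ≤ r ∧ r < n := by
      rw [hrdef, PySem.Int.mod_eq_emod_of_pos hn]
      constructor
      · exact Int.emod_nonneg _ (by omega)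
      · exact Int.emod_lt_of_pos _ hn
    have := fold_eq base r member_ids PySem.Dict.empty 0 r (by omega) (by omega)
    rw [hsum] at this
    rw [this]
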